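-- pv_equiv track=rewrite | github.com/markomanninen/svcs | .svcs/api.py | _format_recent_activity
-- ===== SOURCE A (Python) =====
-- def _format_recent_activity(results):
--     """Format recent activity results with narrative context."""
--     if len(results) > 10:
--         summary = f"Found {len(results)} recent events. Here are the most recent:\n\n"
--     else:
--         summary = f"Recent activity ({len(results)} events):\n\n"
--
--     # Group by date for better readability
--     by_date = {}
--     for event in results[:10]:  # Limit to top 10
--         date = event.get('readable_date', 'Unknown')[:10]  # YYYY-MM-DD
--         if date not in by_date:
--             by_date[date] = []
--         by_date[date].append(event)
--
--     for date in sorted(by_date.keys(), reverse=True):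
--         summary += f"**{date}:**\n"
--         for event in by_date[date]:
--             event_type = event.get('event_type', 'unknown')
--             location = event.get('location', 'unknown')
--             author = event.get('author', 'unknown')
--             summary += f"• {event_type} in {location} by {author}\n"
--         summary += "\n"
--
--     return summary
-- ===== SOURCE B (Python) =====
-- def _format_recent_activity(results):
--     """Format recent activity results with narrative context."""
--     n = len(results)
--     if n > 10:
--         summary = f"Found {n} recent events. Here are the most recent:\n\n"
--     else:
--         summary = f"Recent activity ({n} events):\n\n"
--
--     # One pass computes each event's date key; no grouping dict is built.
--     recent = results[:10]
--     keys = [e.get('readable_date', 'Unknown')[:10] for e in recent]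
--
--     # Distinct dates, descending; events of a date are selected by a scan,
--     # which preserves the original within-date order.
--     for date in sorted(set(keys), reverse=True):
--         lines = ''.join(
--             f"• {e.get('event_type', 'unknown')} in {e.get('location', 'unknown')} by {e.get('author', 'unknown')}\n"
--             for e, k in zip(recent, keys) if k == date)
--         summary += f"**{date}:**\n{lines}\n"
--     return summary
-- ===== Notes on version B (the rewrite author's own statement) =====
-- stated objective: alternative
-- what changed: Replaces A's incremental by_date dict (membership test + append per event, then sorting the dict keys) with a precomputed key list, sorted(set(keys), reverse=True) for the date order, and a per-date zip/filter scan that selects each date's events directly.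
import Mathlib
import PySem

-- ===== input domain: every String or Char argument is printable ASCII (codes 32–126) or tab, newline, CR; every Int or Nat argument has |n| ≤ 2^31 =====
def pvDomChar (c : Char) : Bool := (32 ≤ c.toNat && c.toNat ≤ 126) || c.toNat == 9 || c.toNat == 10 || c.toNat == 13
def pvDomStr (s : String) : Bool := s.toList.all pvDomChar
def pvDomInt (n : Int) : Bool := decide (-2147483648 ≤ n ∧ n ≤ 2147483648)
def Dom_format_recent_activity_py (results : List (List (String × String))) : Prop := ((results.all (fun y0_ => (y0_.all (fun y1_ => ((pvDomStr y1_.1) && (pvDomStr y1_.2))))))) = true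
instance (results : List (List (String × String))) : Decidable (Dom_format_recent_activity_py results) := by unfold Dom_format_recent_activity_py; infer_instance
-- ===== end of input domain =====

-- B replaces A's incrementally built by_date dict by a precomputed key list,
-- sorted(set(keys), reverse=True) and a per-date selection scan (objective: alternative, same cost).

-- shared primitives of both Pythons: event.get(k, dflt), the date key event.get('readable_date','Unknown')[:10],
-- and the per-event bullet line (each is one expression of the Python source)
def pvGetD (e : List (String × String)) (k dflt : String) : String :=
  (PySem.Dict.mk e).getD k dflt

def pvDateKey (e : List (String × String)) : String :=
  PySem.Str.slice (pvGetD e "readable_date" "Unknown") none (some 10)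

def pvLine (e : List (String × String)) : String :=
  "• " ++ pvGetD e "event_type" "unknown" ++ " in " ++ pvGetD e "location" "unknown"
    ++ " by " ++ pvGetD e "author" "unknown" ++ "\n"

-- ===== PORT A =====
def format_recent_activity_py (results : List (List (String × String))) : String :=
  let summary := if results.length > 10 then
      "Found " ++ toString results.length ++ " recent events. Here are the most recent:\n\n"
    else
      "Recent activity (" ++ toString results.length ++ " events):\n\n"
  let by_date : PySem.Dict String (List (List (String × String))) :=
    (PySem.List.slice results none (some 10)).foldl (fun d event =>
      let date := pvDateKey event
      let d := if d.contains date then d else d.insert date []   -- if date not in by_date: by_date[date] = []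
      d.modify date [] (fun l => l ++ [event])) PySem.Dict.empty -- by_date[date].append(event)
  (PySem.List.sorted by_date.keys (fun x => x) true).foldl (fun summary date =>
    let summary := summary ++ "**" ++ date ++ ":**\n"
    -- by_date[date]: the key is always present, so .getD date [] is exact here
    let summary := (by_date.getD date []).foldl (fun summary event => summary ++ pvLine event) summary
    summary ++ "\n") summary

-- ===== PORT B =====
def format_recent_activity_py_alt (results : List (List (String × String))) : String :=
  let n := results.length
  let summary := if n > 10 then
      "Found " ++ toString n ++ " recent events. Here are the most recent:\n\n"
    else
      "Recent activity (" ++ toString n ++ " events):\n\n"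
  let recent := PySem.List.slice results none (some 10)
  let keys := recent.map pvDateKey
  (PySem.List.sorted (PySem.Set.ofList keys) (fun x => x) true).foldl (fun summary date =>
    let lines := PySem.Str.join ""
      (((recent.zip keys).filter (fun p => p.2 == date)).map (fun p => pvLine p.1))
    summary ++ "**" ++ date ++ ":**\n" ++ lines ++ "\n") summary

-- ===== PRECONDITION & SPEC =====
def Spec_format_recent_activity_py (results : List (List (String × String))) (out : String) : Prop := out = format_recent_activity_py_alt results
instance (results : List (List (String × String))) (out : String) : Decidable (Spec_format_recent_activity_py results out) := by unfold Spec_format_recent_activity_py; infer_instance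

-- ===== CLAIM (what is proved, stated in full; the proofs are below) =====
def Claim_equal_format_recent_activity_py : Prop := ∀ (results : List (List (String × String))), Dom_format_recent_activity_py results → Spec_format_recent_activity_py results (format_recent_activity_py results)

-- ===== LEMMAS AND PROOFS =====

-- the grouping step of port A
def pvStep (d : PySem.Dict String (List (List (String × String))))
    (event : List (String × String)) : PySem.Dict String (List (List (String × String))) :=
  let date := pvDateKey event
  let d := if d.contains date then d else d.insert date []
  d.modify date [] (fun l => l ++ [event])

theorem pvStep_eq_setdefault (d : PySem.Dict String (List (List (String × String))))
    (e : List (String × String)) :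
    pvStep d e = (d.setdefault (pvDateKey e) []).modify (pvDateKey e) [] (fun l => l ++ [e]) := by
  unfold pvStep
  cases h : d.contains (pvDateKey e) with
  | true => simp [PySem.Dict.setdefault_of_contains _ _ h, h]
  | false => simp [PySem.Dict.setdefault_of_not_contains _ _ h, h]

theorem pvGetD_step (d : PySem.Dict String (List (List (String × String))))
    (e : List (String × String)) (c : String) :
    (pvStep d e).getD c [] =
      if pvDateKey e = c then d.getD c [] ++ [e] else d.getD c [] := by
  rw [pvStep_eq_setdefault, PySem.Dict.getD_modify]
  by_cases h : pvDateKey e = c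
  · subst h; simp [PySem.Dict.getD_setdefault_self]
  · simp [h, Ne.symm h, PySem.Dict.getD_eq_get?_getD,
      PySem.Dict.get?_setdefault_of_ne _ _ (Ne.symm h)]

theorem pvGetD_fold (l : List (List (String × String)))
    (d : PySem.Dict String (List (List (String × String)))) (c : String) :
    (l.foldl pvStep d).getD c [] = d.getD c [] ++ l.filter (fun e => pvDateKey e == c) := by
  induction l generalizing d with
  | nil => simp
  | cons e l ih =>
    simp only [List.foldl_cons, ih, pvGetD_step, List.filter_cons, beq_iff_eq]
    by_cases h : pvDateKey e = c <;> simp [h]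

theorem pvKeys_step (d : PySem.Dict String (List (List (String × String))))
    (e : List (String × String)) :
    (pvStep d e).keys = PySem.Set.add d.keys (pvDateKey e) := by
  rw [pvStep_eq_setdefault, PySem.Dict.keys_modify]
  have hc : (d.setdefault (pvDateKey e) []).contains (pvDateKey e) = true := by
    cases h : d.contains (pvDateKey e) with
    | true => rw [PySem.Dict.setdefault_of_contains _ _ h]; exact h
    | false => rw [PySem.Dict.setdefault_of_not_contains _ _ h]
               exact PySem.Dict.contains_insert_self _ _ _
  rw [PySem.Dict.keys_insert_of_contains _ _ hc]
  rw [PySem.Dict.keys_setdefault, PySem.Set.add_eq_ite]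
  by_cases h : pvDateKey e ∈ d.keys
  · simp [h, (PySem.Dict.contains_iff_mem_keys d _).2 h]
  · have : d.contains (pvDateKey e) = false := by
      cases hc : d.contains (pvDateKey e) with
      | true => exact absurd ((PySem.Dict.contains_iff_mem_keys d _).1 hc) h
      | false => rfl
    simp [h, this]

theorem pvKeys_fold (l : List (List (String × String))) :
    (l.foldl pvStep PySem.Dict.empty).keys = PySem.Set.ofList (l.map pvDateKey) := by
  have h : ∀ (d : PySem.Dict String (List (List (String × String)))),
      (l.foldl pvStep d).keys = l.foldl (fun s e => PySem.Set.add s (pvDateKey e)) d.keys := by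
    induction l with
    | nil => intro d; rfl
    | cons e l ih => intro d; simp only [List.foldl_cons, ih, pvKeys_step]
  rw [h, ← PySem.Set.update_map_eq_foldl_add, PySem.Dict.keys_empty,
    PySem.Set.update_nil_left]

theorem pvZipFilter (l : List (List (String × String))) (c : String) :
    (((l.zip (l.map pvDateKey)).filter (fun p => p.2 == c)).map (fun p => pvLine p.1)) =
      (l.filter (fun e => pvDateKey e == c)).map pvLine := by
  induction l with
  | nil => rfl
  | cons e l ih =>
    simp only [List.map_cons, List.zip_cons_cons, List.filter_cons]
    by_cases h : pvDateKey e = c <;> simp [h, ih]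

theorem pvJoin_nil : PySem.Str.join "" [] = "" := rfl

theorem pvJoin_cons (x : String) (xs : List String) :
    PySem.Str.join "" (x :: xs) = x ++ PySem.Str.join "" xs := by
  apply String.toList_inj.mp
  simp only [PySem.Str.toList_join, String.toList_append, List.map_cons]
  cases xs with
  | nil => simp [PySem.Chars.join, List.intercalate]
  | cons y ys =>
      simp only [List.map_cons]
      rw [show ("" : String).toList = [] from rfl, PySem.Chars.join_cons_cons]
      simp

theorem pvFoldLine (l : List (List (String × String))) (s : String) :
    l.foldl (fun s e => s ++ pvLine e) s = s ++ PySem.Str.join "" (l.map pvLine) := by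
  induction l generalizing s with
  | nil => simp [pvJoin_nil]
  | cons e l ih => simp [ih, pvJoin_cons, String.append_assoc]

-- ===== VERDICT (by name: the statement is the Claim_ definition above) =====
theorem format_recent_activity_py_spec : Claim_equal_format_recent_activity_py := by
  intro results _
  show format_recent_activity_py results = format_recent_activity_py_alt results
  unfold format_recent_activity_py format_recent_activity_py_alt
  simp only []
  rw [show ((PySem.List.slice results none (some 10)).foldl (fun d event =>
      let date := pvDateKey event
      let d := if d.contains date then d else d.insert date []
      d.modify date [] (fun l => l ++ [event])) PySem.Dict.empty) =
    ((PySem.List.slice results none (some 10)).foldl pvStep PySem.Dict.empty) from rfl]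
  rw [pvKeys_fold]
  apply PySem.List.foldl_congr_mem
  intro acc date _
  rw [pvGetD_fold, pvZipFilter, pvFoldLine]
  simp [String.append_assoc, PySem.Dict.getD_empty]
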